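-- pv_equiv track=rewrite | github.com/gvpkumar27/genaiops-rag-lab | app/__main__.py | _dominant_source_hits
-- ===== SOURCE A (Python) =====
-- def _dominant_source_hits(hits: list[dict]) -> list[dict]:
--     source_counts: dict[str, int] = {}
--     for hit in hits:
--         source = hit.get("source", "unknown")
--         source_counts[source] = source_counts.get(source, 0) + 1
--     dominant = max(source_counts.items(), key=lambda pair: pair[1])[0]
--     dominant_hits = [hit for hit in hits if hit.get("source", "unknown") == dominant]
--     dominant_hits.sort(key=lambda hit: int(hit.get("chunk_id", -1)))
--     return dominant_hits
-- ===== SOURCE B (Python) =====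
-- def _dominant_source_hits(hits: list[dict]) -> list[dict]:
--     groups: dict[str, list[dict]] = {}
--     for hit in hits:
--         groups.setdefault(hit.get("source", "unknown"), []).append(hit)
--     dominant_hits = max(groups.values(), key=len)
--     return sorted(dominant_hits, key=lambda hit: int(hit.get("chunk_id", -1)))
-- ===== Notes on version B (the rewrite author's own statement) =====
-- stated objective: simpler
-- what changed: B builds a source-to-hits grouped index in one pass and sorts the largest group directly (max over groups.values by len), replacing A's count dict followed by a second filtering scan over all hits.
import Mathlib
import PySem

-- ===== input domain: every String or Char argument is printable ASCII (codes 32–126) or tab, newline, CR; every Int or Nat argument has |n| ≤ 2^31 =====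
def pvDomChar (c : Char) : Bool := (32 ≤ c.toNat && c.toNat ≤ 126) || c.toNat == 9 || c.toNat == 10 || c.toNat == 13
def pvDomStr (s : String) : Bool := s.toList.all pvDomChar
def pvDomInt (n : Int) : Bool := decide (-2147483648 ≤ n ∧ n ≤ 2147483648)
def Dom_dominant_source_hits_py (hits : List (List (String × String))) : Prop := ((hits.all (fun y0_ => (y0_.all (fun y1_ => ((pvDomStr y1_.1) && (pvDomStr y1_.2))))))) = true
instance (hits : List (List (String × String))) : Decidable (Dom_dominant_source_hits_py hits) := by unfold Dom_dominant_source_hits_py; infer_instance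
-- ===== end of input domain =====

-- B replaces A's count-then-refilter two-scan strategy by a single grouping pass whose largest group is sorted directly (objective: simpler).

-- hit.get("source", "unknown")  (the same Python expression appears in both A and B)
def pvSrc (hit : List (String × String)) : String :=
  PySem.Dict.getD (PySem.Dict.mk hit) "source" "unknown"

-- int(hit.get("chunk_id", -1))  (same sort key in both A and B); Pre_ guarantees the
-- int() parse succeeds on every dominant-group hit, the only hits either program parses,
-- so the '.getD 0' is only a totalization guard, never reached on claimed outputs.
def pvChunkKey (hit : List (String × String)) : Int :=
  match PySem.Dict.get? (PySem.Dict.mk hit) "chunk_id" with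
  | none => -1
  | some s => (PySem.Int.ofStr? s).getD 0

-- ===== PORT A =====
def dominant_source_hits_py (hits : List (List (String × String))) : List (List (String × String)) :=
  let source_counts : PySem.Dict String Int :=
    hits.foldl (fun d hit => d.insert (pvSrc hit) (d.getD (pvSrc hit) 0 + 1)) PySem.Dict.empty
  match PySem.List.max? source_counts.items (fun pair => pair.2) with
  | none => []  -- Python: max() raises ValueError here; excluded by Pre_
  | some pair =>
    let dominant := pair.1
    let dominant_hits := hits.filter (fun hit => pvSrc hit == dominant)
    PySem.List.sorted dominant_hits pvChunkKey

-- ===== PORT B =====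
def dominant_source_hits_py_alt (hits : List (List (String × String))) : List (List (String × String)) :=
  let groups : PySem.Dict String (List (List (String × String))) :=
    hits.foldl (fun d hit => d.modify (pvSrc hit) [] (fun l => l ++ [hit])) PySem.Dict.empty
  match PySem.List.max? groups.values (fun v => (v.length : Int)) with
  | none => []  -- Python: max() raises ValueError here; excluded by Pre_
  | some dominant_hits => PySem.List.sorted dominant_hits pvChunkKey

-- ===== PRECONDITION & SPEC =====
-- number of hits with source s, and a declarative reading of Python's max tie-break:
-- s is the dominant source iff its count is maximal and, among maximal counts, its first
-- appearance in hits is earliest (dict insertion order = first-appearance order).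
def pvCnt (hits : List (List (String × String))) (s : String) : Nat :=
  (hits.filter (fun h => pvSrc h == s)).length
def pvIsDominant (hits : List (List (String × String))) (s : String) : Bool :=
  hits.all (fun h =>
    decide (pvCnt hits (pvSrc h) < pvCnt hits s) ||
    (pvCnt hits (pvSrc h) == pvCnt hits s &&
     decide (hits.findIdx (fun x => pvSrc x == s) ≤ hits.findIdx (fun x => pvSrc x == pvSrc h))))

-- Pre_ excludes exactly the inputs on which A raises: empty hits (max() raises ValueError)
-- and inputs where a hit of the dominant source carries a non-int()-parsable "chunk_id"
-- (int() raises ValueError there); B raises in exactly the same cases.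
def Pre_dominant_source_hits_py (hits : List (List (String × String))) : Prop :=
  hits ≠ [] ∧
  (hits.all (fun hit =>
    !pvIsDominant hits (pvSrc hit) ||
    ((PySem.Dict.get? (PySem.Dict.mk hit) "chunk_id").map
      (fun s => (PySem.Int.ofStr? s).isSome)).getD true)) = true
instance (hits : List (List (String × String))) : Decidable (Pre_dominant_source_hits_py hits) := by
  unfold Pre_dominant_source_hits_py; infer_instance

def pvWitness_dominant_source_hits_py : (List (List (String × String))) :=
  [[("source", "a"), ("chunk_id", "2")], [("source", "a"), ("chunk_id", "1")], [("source", "b")]]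

def Spec_dominant_source_hits_py (hits : List (List (String × String))) (out : List (List (String × String))) : Prop := out = dominant_source_hits_py_alt hits
instance (hits : List (List (String × String))) (out : List (List (String × String))) : Decidable (Spec_dominant_source_hits_py hits out) := by unfold Spec_dominant_source_hits_py; infer_instance

-- ===== CLAIM (what is proved, stated in full; the proofs are below) =====
def Claim_equal_dominant_source_hits_py : Prop := ∀ (hits : List (List (String × String))), Dom_dominant_source_hits_py hits → Pre_dominant_source_hits_py hits → Spec_dominant_source_hits_py hits (dominant_source_hits_py hits)

-- ===== LEMMAS AND PROOFS =====

-- abbreviations for the two loop bodies (proof-side only)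
def pvCStep (d : PySem.Dict String Int) (hit : List (String × String)) : PySem.Dict String Int :=
  d.insert (pvSrc hit) (d.getD (pvSrc hit) 0 + 1)
def pvGStep (d : PySem.Dict String (List (List (String × String)))) (hit : List (String × String)) :
    PySem.Dict String (List (List (String × String))) :=
  d.modify (pvSrc hit) [] (fun l => l ++ [hit])

-- the count dict is the image of the group dict under "length of the group"
def pvLen (g : PySem.Dict String (List (List (String × String)))) : PySem.Dict String Int :=
  PySem.Dict.mk (g.items.map (fun kv => (kv.1, (kv.2.length : Int))))

lemma pvLen_get? (g : PySem.Dict String (List (List (String × String)))) (s : String) :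
    (pvLen g).get? s = (g.get? s).map (fun v => (v.length : Int)) := by
  simp [pvLen, PySem.Dict.get?, List.find?_map, Function.comp_def]

lemma pvLen_getD (g : PySem.Dict String (List (List (String × String)))) (s : String) :
    (pvLen g).getD s 0 = ((g.getD s []).length : Int) := by
  simp only [PySem.Dict.getD, pvLen_get?]
  cases g.get? s <;> simp

lemma pvLen_insert (g : PySem.Dict String (List (List (String × String)))) (s : String)
    (v : List (List (String × String))) :
    pvLen (g.insert s v) = (pvLen g).insert s ((v.length : Int)) := by
  apply PySem.Dict.ext
  simp only [pvLen, PySem.Dict.items_insert, PySem.Dict.contains, List.any_map,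
    Function.comp_def, List.map_map]
  by_cases h : (g.items.any fun p => p.1 == s) = true
  · simp only [h, if_true, List.map_map]
    apply List.map_congr_left
    intro p _
    by_cases hp : p.1 = s <;> simp [hp]
  · simp [h]

lemma pv_maxfold_map {α β κ : Type} [LT κ] [DecidableLT κ] (f : α → β) (key : β → κ) :
    ∀ (l : List α) (acc : Option α),
      List.foldl (fun acc x => match acc with
        | none => some x
        | some m => if key m < key x then some x else some m) (acc.map f) (l.map f)
      = (List.foldl (fun acc x => match acc with
        | none => some x
        | some m => if key (f m) < key (f x) then some x else some m) acc l).map f := by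
  intro l
  induction l with
  | nil => intro acc; rfl
  | cons x t ih =>
    intro acc
    cases acc with
    | none =>
      simpa using ih (some x)
    | some m =>
      simp only [List.map_cons, List.foldl_cons, Option.map_some]
      by_cases h : key (f m) < key (f x) <;> simp only [h, if_true, if_false] <;>
        [simpa using ih (some x); simpa using ih (some m)]

lemma pv_max?_map {α β κ : Type} [LT κ] [DecidableLT κ] (f : α → β) (key : β → κ) (l : List α) :
    PySem.List.max? (l.map f) key = (PySem.List.max? l (fun x => key (f x))).map f := by
  simpa using pv_maxfold_map f key l none

-- the counting loop tracks the grouping loop through pvLen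
lemma pv_counts_eq_pvLen :
    ∀ (hits : List (List (String × String))) (g : PySem.Dict String (List (List (String × String)))),
      hits.foldl pvCStep (pvLen g) = pvLen (hits.foldl pvGStep g) := by
  intro hits
  induction hits with
  | nil => intro g; rfl
  | cons h t ih =>
    intro g
    simp only [List.foldl_cons]
    have : pvCStep (pvLen g) h = pvLen (pvGStep g h) := by
      simp only [pvCStep, pvGStep, PySem.Dict.modify, pvLen_insert, pvLen_getD,
        List.length_append, List.length_cons, List.length_nil]
      push_cast
      ring_nf
    rw [this, ih]

-- the group of a source is exactly the filtered hit list
lemma pv_groups_getD :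
    ∀ (hits : List (List (String × String))) (g : PySem.Dict String (List (List (String × String))))
      (c : String),
      (hits.foldl pvGStep g).getD c [] = g.getD c [] ++ hits.filter (fun h => pvSrc h == c) := by
  intro hits
  induction hits with
  | nil => intro g c; simp
  | cons h t ih =>
    intro g c
    simp only [List.foldl_cons, ih, List.filter_cons]
    by_cases hc : pvSrc h = c
    · subst hc
      simp [pvGStep, PySem.Dict.modify]
    · have hbc : (pvSrc h == c) = false := by simp [hc]
      simp [pvGStep, PySem.Dict.modify, PySem.Dict.getD_insert, Ne.symm hc, hbc]

lemma pv_groups_nodup (hits : List (List (String × String))) :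
    (hits.foldl pvGStep PySem.Dict.empty).keys.Nodup := by
  have := PySem.Dict.nodup_keys_foldl_insert_key (ν := List (List (String × String))) hits pvSrc
    (fun d x => d.getD (pvSrc x) [] ++ [x]) PySem.Dict.empty PySem.Dict.nodup_keys_empty
  simpa [pvGStep, PySem.Dict.modify] using this

-- ===== VERDICT (by name: the statement is the Claim_ definition above) =====
theorem dominant_source_hits_py_spec : Claim_equal_dominant_source_hits_py := by
  intro hits _ _
  unfold Spec_dominant_source_hits_py dominant_source_hits_py dominant_source_hits_py_alt
  have hcounts : hits.foldl (fun d hit => d.insert (pvSrc hit) (d.getD (pvSrc hit) 0 + 1))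
      PySem.Dict.empty = pvLen (hits.foldl pvGStep PySem.Dict.empty) := by
    simpa [pvCStep] using pv_counts_eq_pvLen hits PySem.Dict.empty
  have hgroups : hits.foldl (fun d hit => d.modify (pvSrc hit) [] (fun l => l ++ [hit]))
      PySem.Dict.empty = hits.foldl pvGStep PySem.Dict.empty := rfl
  rw [hcounts, hgroups]
  simp only [pvLen, PySem.Dict.values, pv_max?_map]
  cases hm : PySem.List.max? (hits.foldl pvGStep PySem.Dict.empty).items
      (fun kv => (kv.2.length : Int)) with
  | none => simp
  | some kv =>
    have hmem : (kv.1, kv.2) ∈ (hits.foldl pvGStep PySem.Dict.empty).items := by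
      simpa using PySem.List.max?_mem hm
    have hget : (hits.foldl pvGStep PySem.Dict.empty).getD kv.1 [] = kv.2 :=
      PySem.Dict.getD_of_mem_items _ hmem (pv_groups_nodup hits) []
    have hfilter : hits.filter (fun h => pvSrc h == kv.1) = kv.2 := by
      rw [← hget, pv_groups_getD]; simp
    simp [hfilter]
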